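-- pv_equiv track=rewrite | github.com/dirtysalt/codes | misc/leetcode/minimum-interval-to-include-each-query.py | mergeAndFilter
-- ===== SOURCE A (Python) =====
-- def mergeAndFilter(data):
--     data = [(x, y, z) for (x, y, z) in data if x != y]
--     out = []
--     x, y, z = data[0]
--     for i in range(1, len(data)):
--         if data[i][2] == z:
--             y = data[i][1]
--         else:
--             out.append((x, y, z))
--             x, y, z = data[i]
--     out.append((x, y, z))
--     return out
-- ===== SOURCE B (Python) =====
-- def mergeAndFilter(data):
--     kept = [(x, y, z) for (x, y, z) in data if x != y]
--     out = []
--     for x, y, z in reversed(kept):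
--         if out and out[-1][2] == z:
--             out[-1] = (x, out[-1][1], z)
--         else:
--             out.append((x, y, z))
--     out.reverse()
--     return out
-- ===== Notes on version B (the rewrite author's own statement) =====
-- stated objective: alternative
-- what changed: B replaces A's forward loop carrying a pending-run state triple by a single backward pass that merges each element into the last emitted output entry (building the result back-to-front), with no pending state and no crash on empty input.
import Mathlib
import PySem

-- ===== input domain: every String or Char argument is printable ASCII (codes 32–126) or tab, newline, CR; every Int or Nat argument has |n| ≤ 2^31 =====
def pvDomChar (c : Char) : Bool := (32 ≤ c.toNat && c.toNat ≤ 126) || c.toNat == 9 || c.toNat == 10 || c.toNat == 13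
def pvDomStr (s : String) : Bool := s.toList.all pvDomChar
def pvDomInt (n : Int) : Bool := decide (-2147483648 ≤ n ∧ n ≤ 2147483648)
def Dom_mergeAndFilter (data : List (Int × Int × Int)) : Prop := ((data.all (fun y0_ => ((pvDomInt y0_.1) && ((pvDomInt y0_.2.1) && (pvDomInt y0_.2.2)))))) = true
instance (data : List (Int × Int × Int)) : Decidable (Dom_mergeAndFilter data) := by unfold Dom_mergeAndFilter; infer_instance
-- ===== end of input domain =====

-- B merges runs in one backward pass into the output's last entry instead of A's
-- forward loop carrying a pending-run state triple; return values proved equal wherever A returns.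

-- ===== PORT A =====
-- A's loop body: state st = (x, y, z, out), ti = data[i].
def stepA (st : Int × Int × Int × List (Int × Int × Int)) (ti : Int × Int × Int) :
    Int × Int × Int × List (Int × Int × Int) :=
  if ti.2.2 == st.2.2.1 then (st.1, ti.2.1, st.2.2.1, st.2.2.2)
  else (ti.1, ti.2.1, ti.2.2, st.2.2.2 ++ [(st.1, st.2.1, st.2.2.1)])

-- A's loop over range(1, len(data)) with state (x, y, z, out) is the foldl of stepA over
-- the tail of the filtered list; the [] case is where Python raises IndexError on data[0]
-- (excluded by Pre_).
def mergeAndFilter (data : List (Int × Int × Int)) : List (Int × Int × Int) :=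
  let d := data.filter (fun t => t.1 ≠ t.2.1)
  match d with
  | [] => []
  | t0 :: rest =>
    let st := rest.foldl stepA (t0.1, t0.2.1, t0.2.2, [])
    st.2.2.2 ++ [(st.1, st.2.1, st.2.2.1)]

-- ===== PORT B =====
-- one backward step of Source B's loop body: out is held reversed (head = out[-1]),
-- so Source B's final out.reverse() is the list exactly as held here.
def altStep (t : Int × Int × Int) (out : List (Int × Int × Int)) : List (Int × Int × Int) :=
  match out with
  | [] => [t]
  | (x', y', z') :: rest =>
      if t.2.2 == z' then (t.1, y', z') :: rest
      else t :: (x', y', z') :: rest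

def mergeAndFilter_alt (data : List (Int × Int × Int)) : List (Int × Int × Int) :=
  let kept := data.filter (fun t => t.1 ≠ t.2.1)
  kept.reverse.foldl (fun out t => altStep t out) []

-- ===== PRECONDITION & SPEC =====
-- Pre_ excludes exactly the inputs on which A raises IndexError (the filtered list is empty).
def Pre_mergeAndFilter (data : List (Int × Int × Int)) : Prop :=
  data.filter (fun t => t.1 ≠ t.2.1) ≠ []
instance (data : List (Int × Int × Int)) : Decidable (Pre_mergeAndFilter data) := by
  unfold Pre_mergeAndFilter; infer_instance

def pvWitness_mergeAndFilter : (List (Int × Int × Int)) := [(1, 2, 0), (2, 3, 0), (3, 4, 1)]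

def Spec_mergeAndFilter (data : List (Int × Int × Int)) (out : List (Int × Int × Int)) : Prop := out = mergeAndFilter_alt data
instance (data : List (Int × Int × Int)) (out : List (Int × Int × Int)) : Decidable (Spec_mergeAndFilter data out) := by unfold Spec_mergeAndFilter; infer_instance

-- ===== CLAIM (what is proved, stated in full; the proofs are below) =====
def Claim_equal_mergeAndFilter : Prop := ∀ (data : List (Int × Int × Int)), Dom_mergeAndFilter data → Pre_mergeAndFilter data → Spec_mergeAndFilter data (mergeAndFilter data)

-- ===== LEMMAS AND PROOFS =====

-- recursive characterisation of A's forward loop: p = the pending run (x, y, z)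
def runA (p : Int × Int × Int) (l : List (Int × Int × Int)) : List (Int × Int × Int) :=
  match l with
  | [] => [p]
  | t :: ls => if t.2.2 == p.2.2 then runA (p.1, t.2.1, p.2.2) ls
               else p :: runA t ls

theorem foldA_eq_runA (l : List (Int × Int × Int)) :
    ∀ (x y z : Int) (out : List (Int × Int × Int)),
      (List.foldl stepA (x, y, z, out) l).2.2.2
        ++ [((List.foldl stepA (x, y, z, out) l).1,
             (List.foldl stepA (x, y, z, out) l).2.1,
             (List.foldl stepA (x, y, z, out) l).2.2.1)]
      = out ++ runA (x, y, z) l := by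
  induction l with
  | nil => intro x y z out; simp [runA]
  | cons t ls ih =>
    intro x y z out
    obtain ⟨t1, t2, t3⟩ := t
    by_cases h : t3 = z
    · subst h
      simp only [List.foldl_cons, stepA, runA, beq_self_eq_true, if_true]
      exact ih x t2 t3 out
    · have hb : ¬ ((t3 == z) = true) := by simp [h]
      simp only [List.foldl_cons, stepA, runA]
      rw [if_neg hb, if_neg hb]
      rw [ih t1 t2 t3 (out ++ [(x, y, z)])]
      simp

theorem runA_eq_altStep (l : List (Int × Int × Int)) (p : Int × Int × Int) :
    runA p l = altStep p (l.foldr altStep []) := by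
  induction l generalizing p with
  | nil => simp [runA, altStep]
  | cons t ls ih =>
    obtain ⟨t1, t2, t3⟩ := t
    obtain ⟨p1, p2, p3⟩ := p
    simp only [List.foldr_cons]
    rcases hM : ls.foldr altStep [] with _ | ⟨⟨a, b, c⟩, r⟩
    · by_cases h : t3 = p3
      · subst h; simp [runA, altStep, ih, hM]
      · simp [runA, altStep, ih, hM, h, Ne.symm h]
    · by_cases h : t3 = p3
      · subst h
        by_cases hc : t3 = c
        · subst hc; simp [runA, altStep, ih, hM]
        · simp [runA, altStep, ih, hM, hc]
      · by_cases hc : t3 = c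
        · subst hc; simp [runA, altStep, ih, hM, h, Ne.symm h]
        · simp [runA, altStep, ih, hM, h, hc, Ne.symm h]

-- ===== VERDICT (by name: the statement is the Claim_ definition above) =====
theorem mergeAndFilter_spec : Claim_equal_mergeAndFilter := by
  intro data _ hpre
  unfold Spec_mergeAndFilter
  cases hd : data.filter (fun t => t.1 ≠ t.2.1) with
  | nil => exact absurd hd hpre
  | cons t0 rest =>
    obtain ⟨a, b, c⟩ := t0
    simp only [mergeAndFilter, mergeAndFilter_alt, hd, List.foldl_reverse, List.foldr_cons]
    rw [foldA_eq_runA rest a b c []]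
    simp [runA_eq_altStep rest (a, b, c)]
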